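-- pv_equiv track=rewrite | github.com/reisenx/2110101-COM-PROG | 09-Nested-Structure/09_MoreDC_34/09_MoreDC_34.py | pattern2
-- ===== SOURCE A (Python) =====
-- def pattern2(nrows,ncols):
--     # Create nrows x ncols matrix
--     matrix = []
--     for i in range(1, nrows+1):
--         num = i
--         row = []
--         for j in range(ncols):
--             row.append(num)
--             num += nrows
--         # Add each row to a matrix
--         matrix.append(row)
--     return matrix
-- ===== SOURCE B (Python) =====
-- def pattern2(nrows, ncols):
--     # Column-major construction: each column j is the run j*nrows+1 .. j*nrows+nrows,
--     # then reshape to rows by transposition with zip.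
--     if ncols <= 0:
--         # zip(*[]) would collapse; keep the nrows-empty-rows shape.
--         return [[] for _ in range(nrows)]
--     if nrows <= 0:
--         return []
--     cols = [list(range(j * nrows + 1, j * nrows + nrows + 1)) for j in range(ncols)]
--     return [list(t) for t in zip(*cols)]
-- ===== Notes on version B (the rewrite author's own statement) =====
-- stated objective: alternative
-- what changed: B builds the matrix column-major (each column is one contiguous range j*nrows+1..j*nrows+nrows) and reshapes to rows by transposition with zip, instead of A's row-by-row fill with a running accumulator num += nrows.
import Mathlib
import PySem

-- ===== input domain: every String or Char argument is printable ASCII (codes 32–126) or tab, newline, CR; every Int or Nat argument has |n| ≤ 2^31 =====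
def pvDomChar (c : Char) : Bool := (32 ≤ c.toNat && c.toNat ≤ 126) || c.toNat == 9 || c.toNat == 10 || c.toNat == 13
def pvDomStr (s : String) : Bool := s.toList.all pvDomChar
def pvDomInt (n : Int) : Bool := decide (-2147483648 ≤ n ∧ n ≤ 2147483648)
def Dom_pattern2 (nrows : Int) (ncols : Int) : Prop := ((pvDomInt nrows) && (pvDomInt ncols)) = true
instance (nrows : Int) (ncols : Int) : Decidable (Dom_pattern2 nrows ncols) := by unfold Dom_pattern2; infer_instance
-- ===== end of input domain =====

-- B builds the matrix column-major and transposes; A fills row by row with an accumulator. Same output, alternative decomposition.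

-- ===== PORT A =====
def pattern2 (nrows : Int) (ncols : Int) : List (List Int) :=
  (PySem.List.pyRange 1 (nrows + 1) 1).foldl (fun matrix i =>
    let st := (PySem.List.pyRange 0 ncols 1).foldl
      (fun (st : List Int × Int) _ => (st.1 ++ [st.2], st.2 + nrows)) ([], i)
    matrix ++ [st.1]) []

-- ===== PORT B =====
-- zip(*cols) is ported by hand as index-based transposition up to the shortest column
-- (exact for Python's zip over lists); everything else follows Source B line by line.
def pyZipStar (cols : List (List Int)) : List (List Int) :=
  (List.range ((cols.map List.length).min?.getD 0)).map (fun t => cols.map (fun c => c.getD t 0))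

def pattern2_alt (nrows : Int) (ncols : Int) : List (List Int) :=
  if ncols ≤ 0 then
    (PySem.List.pyRange 0 nrows 1).map (fun _ => ([] : List Int))
  else if nrows ≤ 0 then []
  else
    pyZipStar ((PySem.List.pyRange 0 ncols 1).map
      (fun j => PySem.List.pyRange (j * nrows + 1) (j * nrows + nrows + 1) 1))

-- ===== PRECONDITION & SPEC =====
def Spec_pattern2 (nrows : Int) (ncols : Int) (out : List (List Int)) : Prop := out = pattern2_alt nrows ncols
instance (nrows : Int) (ncols : Int) (out : List (List Int)) : Decidable (Spec_pattern2 nrows ncols out) := by unfold Spec_pattern2; infer_instance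

-- ===== CLAIM (what is proved, stated in full; the proofs are below) =====
def Claim_equal_pattern2 : Prop := ∀ (nrows : Int) (ncols : Int), Dom_pattern2 nrows ncols → Spec_pattern2 nrows ncols (pattern2 nrows ncols)

-- ===== LEMMAS AND PROOFS =====

-- A's inner loop appends i, i+nrows, … (one entry per loop iteration) and steps the accumulator.
lemma inner_fold (nrows : Int) : ∀ (l : List Int) (i : Int) (acc : List Int),
    l.foldl (fun (st : List Int × Int) _ => (st.1 ++ [st.2], st.2 + nrows)) (acc, i)
      = (acc ++ (List.range l.length).map (fun (j : Nat) => i + (j : Int) * nrows),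
         i + (l.length : Int) * nrows) := by
  intro l
  induction l with
  | nil => simp
  | cons x xs ih =>
    intro i acc
    simp only [List.foldl_cons, ih, List.length_cons]
    have hr : List.range (xs.length + 1) = List.range 1 ++ (List.range xs.length).map (fun j => 1 + j) := by
      rw [Nat.add_comm, List.range_add]
    rw [Prod.ext_iff]
    refine ⟨?_, by push_cast; ring⟩
    rw [hr, List.map_append, List.map_map]
    simp only [List.range_one, List.map_cons, List.map_nil, List.singleton_append]
    have hhead : i + (((0 : Nat) : Int)) * nrows = i := by push_cast; ring
    have hmap : List.map ((fun (j : Nat) => i + (j : Int) * nrows) ∘ fun j => 1 + j) (List.range xs.length)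
        = List.map (fun (j : Nat) => i + nrows + (j : Int) * nrows) (List.range xs.length) := by
      apply List.map_congr_left; intro j _
      simp only [Function.comp_apply]; push_cast; ring
    rw [hmap, hhead]
    simp

lemma min?_replicate {x : Nat} : ∀ (n : Nat), (List.replicate (n + 1) x).min? = some x := by
  intro n
  induction n with
  | zero => simp
  | succ n ih => rw [List.replicate_succ, List.min?_cons, ih]; simp

-- A in closed form: entry (k, j) is (1+k) + j*nrows.
lemma pattern2_closed (nrows ncols : Int) :
    pattern2 nrows ncols
      = (List.range nrows.toNat).map (fun (k : Nat) =>
          (List.range ncols.toNat).map (fun (j : Nat) => (1 + (k : Int)) + (j : Int) * nrows)) := by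
  unfold pattern2
  simp only [inner_fold nrows]
  simp only [List.nil_append, PySem.List.length_pyRange_one]
  rw [PySem.List.foldl_append_singleton_eq_map, PySem.List.pyRange_one 1 (nrows + 1), List.map_map]
  have h1 : (nrows + 1 - 1).toNat = nrows.toNat := by omega
  have h2 : (ncols - 0).toNat = ncols.toNat := by omega
  rw [h1, h2]
  apply List.map_congr_left; intro k _
  simp only [Function.comp_apply]

-- B in closed form (positive ncols): row t lists j*nrows + 1 + t over the columns j.
lemma alt_closed (nrows ncols : Int) (h : 0 < ncols) :
    pattern2_alt nrows ncols
      = (List.range nrows.toNat).map (fun (t : Nat) =>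
          (List.range ncols.toNat).map (fun (j : Nat) => (j : Int) * nrows + 1 + (t : Int))) := by
  unfold pattern2_alt pyZipStar
  rw [if_neg (by omega)]
  by_cases hr : nrows ≤ 0
  · rw [if_pos hr]
    have : nrows.toNat = 0 := by omega
    rw [this]
    simp
  rw [if_neg hr, PySem.List.pyRange_one 0 ncols, List.map_map]
  have h2 : (ncols - 0).toNat = ncols.toNat := by omega
  rw [h2]
  have hcols : (List.range ncols.toNat).map
      ((fun j => PySem.List.pyRange (j * nrows + 1) (j * nrows + nrows + 1) 1) ∘ fun (k : Nat) => (0 : Int) + (k : Int))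
      = (List.range ncols.toNat).map
          (fun (j : Nat) => (List.range nrows.toNat).map (fun (t : Nat) => (j : Int) * nrows + 1 + (t : Int))) := by
    apply List.map_congr_left; intro j _
    simp only [Function.comp_apply, zero_add]
    rw [PySem.List.pyRange_one]
    have hN : ((j : Int) * nrows + nrows + 1 - ((j : Int) * nrows + 1)).toNat = nrows.toNat := by omega
    rw [hN]
  rw [hcols]
  have hlen : ((List.range ncols.toNat).map
      (fun (j : Nat) => (List.range nrows.toNat).map (fun (t : Nat) => (j : Int) * nrows + 1 + (t : Int)))).map List.length
      = List.replicate ncols.toNat nrows.toNat := by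
    rw [List.map_map, List.eq_replicate_iff]
    refine ⟨by simp, ?_⟩
    intro b hb
    simp only [List.mem_map] at hb
    obtain ⟨j, _, hj⟩ := hb
    simp [← hj]
  rw [hlen]
  obtain ⟨c, hc⟩ : ∃ c, ncols.toNat = c + 1 := ⟨ncols.toNat - 1, by omega⟩
  rw [hc, min?_replicate c, Option.getD_some, ← hc]
  apply List.map_congr_left; intro t ht
  rw [List.map_map]
  apply List.map_congr_left; intro j _
  simp only [Function.comp_apply]
  rw [List.getD_eq_getElem?_getD, List.getElem?_map, List.getElem?_range (List.mem_range.mp ht)]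
  simp only [Option.map_some, Option.getD_some]

-- ===== VERDICT (by name: the statement is the Claim_ definition above) =====
theorem pattern2_spec : Claim_equal_pattern2 := by
  intro nrows ncols _
  unfold Spec_pattern2
  rw [pattern2_closed]
  by_cases h : 0 < ncols
  · rw [alt_closed nrows ncols h]
    apply List.map_congr_left; intro t _
    apply List.map_congr_left; intro j _; ring
  · have hc : ncols.toNat = 0 := by omega
    unfold pattern2_alt
    rw [if_pos (by omega), PySem.List.pyRange_one 0 nrows, List.map_map]
    have h2 : (nrows - 0).toNat = nrows.toNat := by omega
    rw [h2, hc]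
    simp [Function.comp_def, List.map_const']
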